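-- pv_equiv track=rewrite | github.com/Melodiz/CodeRun | Algorithms/Medium/27_sum_of_cubes/solution.py | solution
-- ===== SOURCE A (Python) =====
-- def solution(N):
--     # Initialize the list of cubes up to the cube root of N
--     max_k = int(round(N ** (1/3))) + 2  # Adding buffer to avoid missing due to floating errors
--     cubes = []
--     for k in range(1, max_k + 1):
--         cube = k ** 3
--         if cube <= N:
--             cubes.append(cube)
--         else:
--             break
--
--     # Initialize DP array
--     dp = [float('inf')] * (N + 1)
--     dp[0] = 0  # Base case: 0 cubes needed for 0
--
--     for i in range(1, N + 1):
--         for cube in cubes: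
--             if cube <= i:
--                 if dp[i - cube] + 1 < dp[i]:
--                     dp[i] = dp[i - cube] + 1
--     return dp[N]
-- ===== SOURCE B (Python) =====
-- def solution(N):
--     # BFS by levels over the values 0..N: level d holds exactly the numbers needing d cubes.
--     if N <= 0:
--         return 0
--     cubes = []
--     k = 1
--     while k * k * k <= N:
--         cubes.append(k * k * k)
--         k += 1
--     visited = [False] * (N + 1)
--     visited[0] = True
--     frontier = [0]
--     level = 0
--     while not visited[N]:
--         nxt = []
--         for v in frontier:
--             for c in cubes:
--                 w = v + c
--                 if w <= N and not visited[w]: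
--                     visited[w] = True
--                     nxt.append(w)
--         frontier = nxt
--         level += 1
--     return level
-- ===== Notes on version B (the rewrite author's own statement) =====
-- stated objective: alternative
-- what changed: Replaces the bottom-up min-DP table filled for every value up to N with a breadth-first search by levels from zero over cube steps (boolean visited array + frontier list); the first level at which N becomes visited is the answer.
import Mathlib
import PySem

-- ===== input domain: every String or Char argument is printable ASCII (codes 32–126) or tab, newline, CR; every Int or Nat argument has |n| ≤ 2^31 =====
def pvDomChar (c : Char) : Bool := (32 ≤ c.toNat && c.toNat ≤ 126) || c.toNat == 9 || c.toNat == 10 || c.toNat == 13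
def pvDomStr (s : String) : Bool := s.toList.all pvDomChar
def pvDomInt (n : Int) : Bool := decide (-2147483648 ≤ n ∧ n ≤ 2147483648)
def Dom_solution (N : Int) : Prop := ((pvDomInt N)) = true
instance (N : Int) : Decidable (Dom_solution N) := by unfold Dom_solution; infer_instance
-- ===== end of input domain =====

-- B re-implements A's min-cubes DP as a breadth-first search by levels; equal return value for every
-- nonnegative N (A raises TypeError on negative N, excluded by Pre_; B returns zero there).

-- ===== PORT A =====
-- integer stand-in for Python's float `int(round(N ** (1/3)))`: on the domain |N| ≤ 2^31 the float value
-- differs from the exact integer cube root by at most the +2 buffer A already adds, and the loop below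
-- breaks at the first k with k^3 > N, so the resulting `cubes` list is exactly the same.
theorem pvIcbrt_ex (n : Nat) : ∃ k, n < (k+1) * ((k+1) * (k+1)) := ⟨n, by nlinarith⟩
def pvIcbrt (n : Nat) : Nat := Nat.find (pvIcbrt_ex n)

-- the `for k in range(1, max_k+1): … else: break` loop of A
def pvCubesLoopA (N : Int) : List Int → List Int
  | [] => []
  | k :: ks => if k ^ 3 ≤ N then k ^ 3 :: pvCubesLoopA N ks else []

def solution (N : Int) : Int :=
  let maxK : Int := ((pvIcbrt N.toNat : Nat) : Int) + 2
  let cubes := pvCubesLoopA N (PySem.List.pyRange 1 (maxK + 1))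
  -- dp : float('inf') ↦ none (only ever compared / incremented, exact); the Python list is an Array here,
  -- indexed with `.toNat`/getElem? — exact on Pre_ (every index used is ≥ 0 and in range, proved below);
  -- dp[0] = 0
  let dp0 : Array (Option Int) := (Array.replicate (N + 1).toNat (none : Option Int)).setIfInBounds 0 (some 0)
  let dp := (PySem.List.pyRange 1 (N + 1)).foldl (fun (dp : Array (Option Int)) (i : Int) =>
    cubes.foldl (fun dp cube =>
      if cube ≤ i then
        match dp[(i - cube).toNat]?, dp[i.toNat]? with
        | some (some v), some (some w) => if v + 1 < w then dp.setIfInBounds i.toNat (some (v + 1)) else dp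
        | some (some v), some none => dp.setIfInBounds i.toNat (some (v + 1))
        | _, _ => dp
      else dp) dp) dp0
  -- dp[N] is a finite int for every N ≥ 0 (proved below); the `_ => 0` arm is unreachable on Pre_
  match dp[N.toNat]? with
  | some (some v) => v
  | _ => 0

-- ===== PORT B =====
-- `while k*k*k <= N: cubes.append(k*k*k); k += 1` — fuel N.toNat+1 suffices since k ≤ N inside the loop
def pvCubesB (N : Int) : Nat → Int → List Int
  | 0, _ => []
  | fuel + 1, k => if k * k * k ≤ N then k * k * k :: pvCubesB N fuel (k + 1) else []

-- the `while not visited[N]:` BFS loop; fuel N.toNat+1 suffices (the answer is ≤ N, proved below);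
-- Python's bool list / int list are Arrays here, indexed with `.toNat` — exact on Pre_ (all values are ≥ 0)
def pvBfsB (N : Int) (cubes : List Int) : Nat → Array Bool → Array Int → Int → Int
  | 0, _, _, level => level
  | fuel + 1, visited, frontier, level =>
    if visited.getD N.toNat false then level
    else
      let step := frontier.foldl (fun (p : Array Bool × Array Int) v =>
        cubes.foldl (fun (p : Array Bool × Array Int) c =>
          let w := v + c
          if w ≤ N ∧ p.1.getD w.toNat false = false then (p.1.setIfInBounds w.toNat true, p.2.push w) else p) p)
        (visited, (#[] : Array Int))
      pvBfsB N cubes fuel step.1 step.2 (level + 1)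

def solution_alt (N : Int) : Int :=
  if N ≤ 0 then 0
  else
    let cubes := pvCubesB N (N.toNat + 1) 1
    pvBfsB N cubes (N.toNat + 1) ((Array.replicate (N.toNat + 1) false).setIfInBounds 0 true) #[0] 0

-- ===== PRECONDITION & SPEC =====
-- A raises TypeError for negative N (its float cube root is complex); Pre_ admits exactly the N on which A returns.
def Pre_solution (N : Int) : Prop := 0 ≤ N
instance (N : Int) : Decidable (Pre_solution N) := by unfold Pre_solution; infer_instance
def pvWitness_solution : Int := (5)

def Spec_solution (N : Int) (out : Int) : Prop := out = solution_alt N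
instance (N : Int) (out : Int) : Decidable (Spec_solution N out) := by unfold Spec_solution; infer_instance

-- ===== CLAIM (what is proved, stated in full; the proofs are below) =====
def Claim_equal_solution : Prop := ∀ (N : Int), Dom_solution N → Pre_solution N → Spec_solution N (solution N)

-- ===== LEMMAS AND PROOFS =====


def pvIsCubeB (c : Nat) : Bool := (List.range (c + 1)).any (fun k => 1 ≤ k && k * k * k == c)

theorem pvIsCubeB_iff (c : Nat) : pvIsCubeB c = true ↔ ∃ k : Nat, 1 ≤ k ∧ c = k * k * k := by
  unfold pvIsCubeB
  simp only [List.any_eq_true, List.mem_range, Bool.and_eq_true, decide_eq_true_eq, beq_iff_eq]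
  constructor
  · rintro ⟨k, _, hk1, hk3⟩; exact ⟨k, hk1, hk3.symm⟩
  · rintro ⟨k, hk1, hk3⟩; exact ⟨k, by nlinarith, hk1, hk3.symm⟩

def pvM : Nat → Nat
  | 0 => 0
  | n + 1 =>
    1 + (((List.range (n + 1)).filter (fun j => pvIsCubeB (n + 1 - j))).attach.map
          (fun j => pvM j.1)).foldl min (pvM n)
decreasing_by
  · omega
  · have := j.2
    simp only [List.mem_filter, List.mem_range] at this
    omega

theorem pvM_succ (n : Nat) : pvM (n + 1) =
    1 + (((List.range (n + 1)).filter (fun j => pvIsCubeB (n + 1 - j))).attach.map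
          (fun j => pvM j.1)).foldl min (pvM n) := by
  rw [pvM]

theorem pvM_le (n c : Nat) (h1 : 1 ≤ c) (h2 : c ≤ n) (h3 : pvIsCubeB c = true) :
    pvM n ≤ pvM (n - c) + 1 := by
  obtain ⟨m, rfl⟩ : ∃ m, n = m + 1 := ⟨n - 1, by omega⟩
  rw [pvM_succ]
  have hj : (m + 1 - c) ∈ (List.range (m + 1)).filter (fun j => pvIsCubeB (m + 1 - j)) := by
    simp only [List.mem_filter, List.mem_range]
    constructor
    · omega
    · have : m + 1 - (m + 1 - c) = c := by omega
      rw [this]; exact h3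
  have hmem : pvM (m + 1 - c) ∈ (((List.range (m + 1)).filter (fun j => pvIsCubeB (m + 1 - j))).attach.map
          (fun j => pvM j.1)) := List.mem_map.mpr ⟨⟨_, hj⟩, List.mem_attach _ _, rfl⟩
  have := (PySem.List.foldl_min_le (((List.range (m + 1)).filter (fun j => pvIsCubeB (m + 1 - j))).attach.map
          (fun j => pvM j.1)) (pvM m)).2 _ hmem
  omega

theorem pvM_attained (n : Nat) (h : 1 ≤ n) :
    ∃ c, 1 ≤ c ∧ c ≤ n ∧ pvIsCubeB c = true ∧ pvM n = pvM (n - c) + 1 := by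
  obtain ⟨m, rfl⟩ : ∃ m, n = m + 1 := ⟨n - 1, by omega⟩
  rw [pvM_succ]
  rcases PySem.List.foldl_min_mem (((List.range (m + 1)).filter (fun j => pvIsCubeB (m + 1 - j))).attach.map
          (fun j => pvM j.1)) (pvM m) with hc | hc
  · refine ⟨1, le_refl _, by omega, by decide, ?_⟩
    rw [hc]
    simp only [Nat.add_sub_cancel]
    omega
  · rcases List.mem_map.mp hc with ⟨⟨j, hj⟩, _, hval⟩
    simp only [List.mem_filter, List.mem_range] at hj
    refine ⟨m + 1 - j, by omega, by omega, hj.2, ?_⟩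
    have : m + 1 - (m + 1 - j) = j := by omega
    rw [this, ← hval]
    show 1 + pvM j = pvM j + 1
    omega

theorem pvM_le_self (n : Nat) : pvM n ≤ n := by
  induction n with
  | zero => simp [pvM]
  | succ m ih =>
    have := pvM_le (m + 1) 1 (le_refl _) (by omega) (by decide)
    simp only [Nat.add_sub_cancel] at this
    omega

theorem pvM_pos (n : Nat) (h : 1 ≤ n) : 1 ≤ pvM n := by
  obtain ⟨m, rfl⟩ : ∃ m, n = m + 1 := ⟨n - 1, by omega⟩
  rw [pvM_succ]; omega

theorem pvIcbrt_ub (n k : Nat) (h : k * k * k ≤ n) : k ≤ pvIcbrt n := by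
  by_contra hc
  have hc' : pvIcbrt n + 1 ≤ k := by omega
  have hs := Nat.find_spec (pvIcbrt_ex n)
  have hm : (pvIcbrt n + 1) * ((pvIcbrt n + 1) * (pvIcbrt n + 1)) ≤ k * (k * k) :=
    Nat.mul_le_mul hc' (Nat.mul_le_mul hc' hc')
  unfold pvIcbrt at hm
  have : k * (k * k) ≤ n := by
    have : k * k * k = k * (k * k) := by ring
    omega
  omega

theorem pvCube_mono (a k : Int) (ha : 1 ≤ a) (hk : a ≤ k) : a * a * a ≤ k * k * k := by
  have h2 : a * a ≤ k * k := by nlinarith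
  have h0 : (0:Int) ≤ k * k := by nlinarith
  nlinarith

theorem cubesA_mem_aux (N : Int) (c : Int) :
    ∀ (t : Nat) (a b : Int), b - a = t → 1 ≤ a →
    (∀ k : Int, a ≤ k → k * k * k ≤ N → k < b) →
    (c ∈ pvCubesLoopA N (PySem.List.pyRange a b) ↔ ∃ k : Int, a ≤ k ∧ k * k * k ≤ N ∧ c = k * k * k) := by
  intro t
  induction t with
  | zero =>
    intro a b hba ha hb
    rw [PySem.List.pyRange_one_eq_nil (by omega)]
    simp only [pvCubesLoopA, List.not_mem_nil, false_iff]
    rintro ⟨k, hk1, hk2, _⟩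
    have := hb k hk1 hk2
    omega
  | succ t ih =>
    intro a b hba ha hb
    rw [PySem.List.pyRange_one_cons (by omega)]
    simp only [pvCubesLoopA]
    have hpow : a ^ 3 = a * a * a := by ring
    rw [hpow]
    split_ifs with hle
    · rw [List.mem_cons, ih (a + 1) b (by omega) (by omega) (fun k hk1 hk2 => hb k (by omega) hk2)]
      constructor
      · rintro (rfl | ⟨k, hk1, hk2, rfl⟩)
        · exact ⟨a, le_refl _, hle, rfl⟩
        · exact ⟨k, by omega, hk2, rfl⟩
      · rintro ⟨k, hk1, hk2, rfl⟩
        rcases eq_or_lt_of_le hk1 with rfl | hlt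
        · exact Or.inl rfl
        · exact Or.inr ⟨k, by omega, hk2, rfl⟩
    · simp only [List.not_mem_nil, false_iff]
      rintro ⟨k, hk1, hk2, _⟩
      exact hle (le_trans (pvCube_mono a k ha hk1) hk2)

theorem memCubesA (N : Int) (hN : 0 ≤ N) (c : Int) :
    c ∈ pvCubesLoopA N (PySem.List.pyRange 1 (((pvIcbrt N.toNat : Nat) : Int) + 2 + 1)) ↔
      (∃ k : Int, 1 ≤ k ∧ c = k * k * k) ∧ c ≤ N := by
  rw [cubesA_mem_aux N c (((pvIcbrt N.toNat : Nat) : Int) + 2).toNat 1 _ (by omega) (by omega) ?_]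
  · constructor
    · rintro ⟨k, hk1, hk2, rfl⟩; exact ⟨⟨k, hk1, rfl⟩, hk2⟩
    · rintro ⟨⟨k, hk1, rfl⟩, hk2⟩; exact ⟨k, hk1, hk2, rfl⟩
  · intro k hk1 hk2
    have hkn : k.toNat * k.toNat * k.toNat ≤ N.toNat := by
      have h1 : (k.toNat : Int) = k := by omega
      have : ((k.toNat * k.toNat * k.toNat : Nat) : Int) ≤ ((N.toNat : Nat) : Int) := by
        push_cast
        rw [h1]
        omega
      exact_mod_cast this
    have := pvIcbrt_ub N.toNat k.toNat hkn
    omega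

theorem cubesB_mem_aux (N : Int) (c : Int) :
    ∀ (fuel : Nat) (a : Int), 1 ≤ a →
    (∀ k : Int, a ≤ k → k * k * k ≤ N → (k - a).toNat < fuel) →
    (c ∈ pvCubesB N fuel a ↔ ∃ k : Int, a ≤ k ∧ k * k * k ≤ N ∧ c = k * k * k) := by
  intro fuel
  induction fuel with
  | zero =>
    intro a ha hf
    simp only [pvCubesB, List.not_mem_nil, false_iff]
    rintro ⟨k, hk1, hk2, _⟩
    have := hf k hk1 hk2
    omega
  | succ t ih =>
    intro a ha hf
    simp only [pvCubesB]
    split_ifs with hle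
    · rw [List.mem_cons, ih (a + 1) (by omega) (fun k hk1 hk2 => by have := hf k (by omega) hk2; omega)]
      constructor
      · rintro (rfl | ⟨k, hk1, hk2, rfl⟩)
        · exact ⟨a, le_refl _, hle, rfl⟩
        · exact ⟨k, by omega, hk2, rfl⟩
      · rintro ⟨k, hk1, hk2, rfl⟩
        rcases eq_or_lt_of_le hk1 with rfl | hlt
        · exact Or.inl rfl
        · exact Or.inr ⟨k, by omega, hk2, rfl⟩
    · simp only [List.not_mem_nil, false_iff]
      rintro ⟨k, hk1, hk2, _⟩
      exact hle (le_trans (pvCube_mono a k ha hk1) hk2)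

theorem memCubesB (N : Int) (hN : 0 ≤ N) (c : Int) :
    c ∈ pvCubesB N (N.toNat + 1) 1 ↔ (∃ k : Int, 1 ≤ k ∧ c = k * k * k) ∧ c ≤ N := by
  rw [cubesB_mem_aux N c (N.toNat + 1) 1 (by omega) ?_]
  · constructor
    · rintro ⟨k, hk1, hk2, rfl⟩; exact ⟨⟨k, hk1, rfl⟩, hk2⟩
    · rintro ⟨⟨k, hk1, rfl⟩, hk2⟩; exact ⟨k, hk1, hk2, rfl⟩
  · intro k hk1 hk2
    have : k ≤ N := by nlinarith
    omega

def pvMI (v : Int) : Int := (pvM v.toNat : Int)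

theorem pvCube_one_le (c : Int) (hc : ∃ k : Int, 1 ≤ k ∧ c = k * k * k) : 1 ≤ c := by
  obtain ⟨k, hk1, rfl⟩ := hc
  nlinarith

theorem pvCube_toNat (c : Int) (hc : ∃ k : Int, 1 ≤ k ∧ c = k * k * k) :
    pvIsCubeB c.toNat = true := by
  obtain ⟨k, hk1, rfl⟩ := hc
  rw [pvIsCubeB_iff]
  refine ⟨k.toNat, by omega, ?_⟩
  have h1 : ((k.toNat : Int)) = k := by omega
  have : ((k.toNat * k.toNat * k.toNat : Nat) : Int) = k * k * k := by push_cast; rw [h1]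
  omega

theorem pvCube_ofNat (c : Nat) (hc : pvIsCubeB c = true) :
    ∃ k : Int, 1 ≤ k ∧ (c : Int) = k * k * k := by
  rw [pvIsCubeB_iff] at hc
  obtain ⟨k, hk1, rfl⟩ := hc
  exact ⟨(k : Int), by omega, by push_cast; ring⟩

theorem pvMI_nonneg (v : Int) : 0 ≤ pvMI v := by unfold pvMI; omega

theorem pvMI_le (v c : Int) (hc : ∃ k : Int, 1 ≤ k ∧ c = k * k * k) (hcv : c ≤ v) :
    pvMI v ≤ pvMI (v - c) + 1 := by
  have h1 := pvCube_one_le c hc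
  have h := pvM_le v.toNat c.toNat (by omega) (by omega) (pvCube_toNat c hc)
  unfold pvMI
  have : (v - c).toNat = v.toNat - c.toNat := by omega
  rw [this]
  omega

theorem pvMI_attained (v : Int) (hv : 1 ≤ v) :
    ∃ c : Int, (∃ k : Int, 1 ≤ k ∧ c = k * k * k) ∧ 1 ≤ c ∧ c ≤ v ∧ pvMI v = pvMI (v - c) + 1 := by
  obtain ⟨c, hc1, hc2, hc3, hc4⟩ := pvM_attained v.toNat (by omega)
  refine ⟨(c : Int), pvCube_ofNat c hc3, by omega, by omega, ?_⟩
  unfold pvMI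
  have : (v - (c : Int)).toNat = v.toNat - c := by omega
  rw [this]
  omega

theorem pvMI_le_self (v : Int) (hv : 0 ≤ v) : pvMI v ≤ v := by
  have := pvM_le_self v.toNat
  unfold pvMI
  omega

theorem pvMI_eq_zero (v : Int) (hv : 0 ≤ v) : pvMI v = 0 ↔ v = 0 := by
  unfold pvMI
  constructor
  · intro h
    by_contra hne
    have := pvM_pos v.toNat (by omega)
    omega
  · intro h; subst h; simp [pvM]

def pvBestStep (i : Int) (o : Option Int) (c : Int) : Option Int :=
  if c ≤ i then some (match o with | none => pvMI (i - c) + 1 | some t => min t (pvMI (i - c) + 1)) else o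

theorem best_fold (i : Int) :
    ∀ (cs : List Int) (o : Option Int) (P : Int → Prop),
    (o = none → ∀ c, ¬ P c) →
    (∀ t, o = some t → (∀ c, P c → t ≤ pvMI (i - c) + 1) ∧ (∃ c, P c ∧ t = pvMI (i - c) + 1)) →
    ((cs.foldl (pvBestStep i) o = none → ∀ c, ¬ (P c ∨ (c ∈ cs ∧ c ≤ i))) ∧
     (∀ t, cs.foldl (pvBestStep i) o = some t →
       (∀ c, (P c ∨ (c ∈ cs ∧ c ≤ i)) → t ≤ pvMI (i - c) + 1) ∧
       (∃ c, (P c ∨ (c ∈ cs ∧ c ≤ i)) ∧ t = pvMI (i - c) + 1))) := by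
  intro cs
  induction cs with
  | nil =>
    intro o P hn hs
    refine ⟨fun h c => ?_, fun t ht => ?_⟩
    · rintro (hp | ⟨hm, _⟩)
      · exact hn h c hp
      · exact List.not_mem_nil hm
    · obtain ⟨hb, c₀, hc₀, he⟩ := hs t ht
      refine ⟨fun c hc => ?_, ⟨c₀, Or.inl hc₀, he⟩⟩
      rcases hc with hp | ⟨hm, _⟩
      · exact hb c hp
      · exact absurd hm (List.not_mem_nil)
  | cons c rest ih =>
    intro o P hn hs
    simp only [List.foldl_cons]
    by_cases hci : c ≤ i
    · have hside1 : pvBestStep i o c = none → ∀ c', ¬ (P c' ∨ c' = c) := by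
        unfold pvBestStep
        rw [if_pos hci]
        simp
      have hside2 : ∀ t, pvBestStep i o c = some t →
          (∀ c', (P c' ∨ c' = c) → t ≤ pvMI (i - c') + 1) ∧ ∃ c', (P c' ∨ c' = c) ∧ t = pvMI (i - c') + 1 := by
        intro t ht
        unfold pvBestStep at ht
        rw [if_pos hci] at ht
        injection ht with ht
        cases o with
        | none =>
          simp only at ht
          subst ht
          refine ⟨fun c' hc' => ?_, ⟨c, Or.inr rfl, rfl⟩⟩
          rcases hc' with hp | rfl
          · exact absurd hp (hn rfl c')
          · exact le_refl _
        | some u =>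
          simp only at ht
          subst ht
          obtain ⟨hb, c₁, hc₁, he₁⟩ := hs u rfl
          constructor
          · intro c' hc'
            rcases hc' with hp | rfl
            · exact le_trans (min_le_left _ _) (hb c' hp)
            · exact min_le_right _ _
          · rcases min_cases u (pvMI (i - c) + 1) with ⟨hmin, _⟩ | ⟨hmin, _⟩
            · exact ⟨c₁, Or.inl hc₁, by omega⟩
            · exact ⟨c, Or.inr rfl, by omega⟩
      obtain ⟨r1, r2⟩ := ih (pvBestStep i o c) (fun c' => P c' ∨ c' = c) hside1 hside2
      constructor
      · intro h c'
        have := r1 h c'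
        rintro (hp | ⟨hm, hle⟩)
        · exact this (Or.inl (Or.inl hp))
        · rcases List.mem_cons.mp hm with rfl | hm'
          · exact this (Or.inl (Or.inr rfl))
          · exact this (Or.inr ⟨hm', hle⟩)
      · intro t ht
        obtain ⟨hb, c₀, hc₀, he⟩ := r2 t ht
        constructor
        · intro c' hc'
          apply hb
          rcases hc' with hp | ⟨hm, hle⟩
          · exact Or.inl (Or.inl hp)
          · rcases List.mem_cons.mp hm with rfl | hm'
            · exact Or.inl (Or.inr rfl)
            · exact Or.inr ⟨hm', hle⟩
        · refine ⟨c₀, ?_, he⟩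
          rcases hc₀ with (hp | rfl) | ⟨hm', hle⟩
          · exact Or.inl hp
          · exact Or.inr ⟨List.mem_cons_self, hci⟩
          · exact Or.inr ⟨List.mem_cons_of_mem _ hm', hle⟩
    · have hstep : pvBestStep i o c = o := by unfold pvBestStep; rw [if_neg hci]
      rw [hstep]
      obtain ⟨r1, r2⟩ := ih o P hn hs
      constructor
      · intro h c'
        have := r1 h c'
        rintro (hp | ⟨hm, hle⟩)
        · exact this (Or.inl hp)
        · rcases List.mem_cons.mp hm with rfl | hm'
          · exact hci hle
          · exact this (Or.inr ⟨hm', hle⟩)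
      · intro t ht
        obtain ⟨hb, c₀, hc₀, he⟩ := r2 t ht
        constructor
        · intro c' hc'
          apply hb
          rcases hc' with hp | ⟨hm, hle⟩
          · exact Or.inl hp
          · rcases List.mem_cons.mp hm with rfl | hm'
            · exact absurd hle hci
            · exact Or.inr ⟨hm', hle⟩
        · refine ⟨c₀, ?_, he⟩
          rcases hc₀ with hp | ⟨hm', hle⟩
          · exact Or.inl hp
          · exact Or.inr ⟨List.mem_cons_of_mem _ hm', hle⟩

theorem best_full (N i : Int) (hi : 1 ≤ i) (hiN : i ≤ N) (cs : List Int)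
    (hcs : ∀ c, c ∈ cs ↔ (∃ k : Int, 1 ≤ k ∧ c = k * k * k) ∧ c ≤ N) :
    cs.foldl (pvBestStep i) none = some (pvMI i) := by
  have h1 : (1 : Int) ∈ cs := (hcs 1).mpr ⟨⟨1, le_refl _, by ring⟩, by omega⟩
  obtain ⟨r1, r2⟩ := best_fold i cs none (fun _ => False)
    (fun _ c h => h) (fun t ht => by exact absurd ht (by simp))
  cases hres : cs.foldl (pvBestStep i) none with
  | none => exact absurd (Or.inr ⟨h1, hi⟩) (r1 hres 1)
  | some t =>
    obtain ⟨hb, c₀, hc₀, he⟩ := r2 t hres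
    rcases hc₀ with hf | ⟨hm, hle⟩
    · exact absurd hf not_false
    · have hcube := ((hcs c₀).mp hm).1
      have hlow : pvMI i ≤ t := by
        rw [he]
        exact pvMI_le i c₀ hcube hle
      obtain ⟨c, hcube', hc1, hcw, heq⟩ := pvMI_attained i hi
      have hcmem : c ∈ cs := (hcs c).mpr ⟨hcube', by omega⟩
      have hhigh : t ≤ pvMI i := by
        rw [heq]
        exact hb c (Or.inr ⟨hcmem, hcw⟩)
      exact congrArg some (le_antisymm hhigh hlow)

def pvInner (N v : Int) (p : Array Bool × Array Int) (c : Int) : Array Bool × Array Int :=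
  let w := v + c
  if w ≤ N ∧ p.1.getD w.toNat false = false then (p.1.setIfInBounds w.toNat true, p.2.push w) else p

theorem bfs_inner (N v : Int) (hv0 : 0 ≤ v) (V : Int → Prop) :
    ∀ (cs : List Int), (∀ c ∈ cs, 1 ≤ c) →
    ∀ (p : Array Bool × Array Int) (S : Int → Prop),
    p.1.size = N.toNat + 1 →
    (∀ w : Int, 0 ≤ w → w ≤ N → (p.1.getD w.toNat false = true ↔ (V w ∨ w ∈ p.2))) →
    (∀ w, w ∈ p.2 ↔ S w) →
    (cs.foldl (pvInner N v) p).1.size = N.toNat + 1 ∧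
    (∀ w : Int, 0 ≤ w → w ≤ N →
      ((cs.foldl (pvInner N v) p).1.getD w.toNat false = true ↔ (V w ∨ w ∈ (cs.foldl (pvInner N v) p).2))) ∧
    (∀ w, w ∈ (cs.foldl (pvInner N v) p).2 ↔ S w ∨ ∃ c ∈ cs, w = v + c ∧ w ≤ N ∧ ¬ V w) := by
  intro cs
  induction cs with
  | nil =>
    intro _ p S hsz h1 h2
    refine ⟨hsz, h1, fun w => ?_⟩
    simp only [List.foldl_nil, List.not_mem_nil, false_and, exists_false, or_false]
    exact h2 w
  | cons c rest ih =>
    intro hc1 p S hsz h1 h2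
    have hcge : 1 ≤ c := hc1 c List.mem_cons_self
    have hrest : ∀ c' ∈ rest, 1 ≤ c' := fun c' hc' => hc1 c' (List.mem_cons_of_mem _ hc')
    simp only [List.foldl_cons]
    by_cases hg : v + c ≤ N ∧ p.1.getD (v + c).toNat false = false
    · have hw0 : (0 : Int) ≤ v + c := by omega
      have hnin : ¬ (V (v + c) ∨ (v + c) ∈ p.2) := by
        rw [← h1 (v + c) hw0 hg.1]
        simp [hg.2]
      have hstep : pvInner N v p c = (p.1.setIfInBounds (v + c).toNat true, p.2.push (v + c)) := by
        show (if v + c ≤ N ∧ p.1.getD (v + c).toNat false = false then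
                (p.1.setIfInBounds (v + c).toNat true, p.2.push (v + c)) else p) = _
        rw [if_pos hg]
      rw [hstep]
      have hsz' : (p.1.setIfInBounds (v + c).toNat true).size = N.toNat + 1 := by
        rw [Array.size_setIfInBounds, hsz]
      have h1' : ∀ w : Int, 0 ≤ w → w ≤ N →
          ((p.1.setIfInBounds (v + c).toNat true).getD w.toNat false = true ↔ (V w ∨ w ∈ p.2.push (v + c))) := by
        intro w hw hwN
        rw [Array.getD_eq_getD_getElem?]
        by_cases hww : w = v + c
        · subst hww
          rw [Array.getElem?_setIfInBounds_self, if_pos (by rw [hsz]; omega)]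
          simp only [Option.getD_some]
          simp [Array.mem_push]
        · have hne : (v + c).toNat ≠ w.toNat := by omega
          rw [Array.getElem?_setIfInBounds_ne hne, ← Array.getD_eq_getD_getElem?, h1 w hw hwN]
          simp [Array.mem_push, hww]
      have h2' : ∀ w, w ∈ p.2.push (v + c) ↔ (S w ∨ (w = v + c ∧ w ≤ N ∧ ¬ V w)) := by
        intro w
        rw [Array.mem_push, h2]
        constructor
        · rintro (hs | rfl)
          · exact Or.inl hs
          · exact Or.inr ⟨rfl, hg.1, fun hV => hnin (Or.inl hV)⟩
        · rintro (hs | ⟨rfl, _, _⟩)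
          · exact Or.inl hs
          · exact Or.inr rfl
      obtain ⟨g0, g1, g2⟩ := ih hrest (p.1.setIfInBounds (v + c).toNat true, p.2.push (v + c))
        (fun w => S w ∨ (w = v + c ∧ w ≤ N ∧ ¬ V w)) hsz' h1' h2'
      refine ⟨g0, g1, fun w => Iff.trans (g2 w) ?_⟩
      simp only [List.mem_cons]
      constructor
      · rintro ((hs | ⟨rfl, hn, hv⟩) | ⟨c', hc', rfl, hn, hv⟩)
        · exact Or.inl hs
        · exact Or.inr ⟨c, Or.inl rfl, rfl, hn, hv⟩
        · exact Or.inr ⟨c', Or.inr hc', rfl, hn, hv⟩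
      · rintro (hs | ⟨c', (rfl | hc'), rfl, hn, hv⟩)
        · exact Or.inl (Or.inl hs)
        · exact Or.inl (Or.inr ⟨rfl, hn, hv⟩)
        · exact Or.inr ⟨c', hc', rfl, hn, hv⟩
    · have hstep : pvInner N v p c = p := by
        show (if v + c ≤ N ∧ p.1.getD (v + c).toNat false = false then
                (p.1.setIfInBounds (v + c).toNat true, p.2.push (v + c)) else p) = _
        rw [if_neg hg]
      rw [hstep]
      obtain ⟨g0, g1, g2⟩ := ih hrest p S hsz h1 h2
      refine ⟨g0, g1, fun w => Iff.trans (g2 w) ?_⟩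
      simp only [List.mem_cons]
      constructor
      · rintro (hs | ⟨c', hc', rfl, hn, hv⟩)
        · exact Or.inl hs
        · exact Or.inr ⟨c', Or.inr hc', rfl, hn, hv⟩
      · rintro (hs | ⟨c', (rfl | hc'), rfl, hn, hv⟩)
        · exact Or.inl hs
        · rcases not_and_or.mp hg with hgn | hgn
          · exact absurd hn (by omega)
          · have hget : p.1.getD (v + c').toNat false = true := by
              cases hbool : p.1.getD (v + c').toNat false
              · exact absurd hbool hgn
              · rfl
            rcases (h1 (v + c') (by omega) hn).mp hget with hV | hp2
            · exact absurd hV hv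
            · exact Or.inl ((h2 _).mp hp2)
        · exact Or.inr ⟨c', hc', rfl, hn, hv⟩

theorem bfs_outer (N : Int) (V : Int → Prop) (cs : List Int) (hc1 : ∀ c ∈ cs, 1 ≤ c) :
    ∀ (F : List Int), (∀ v ∈ F, 0 ≤ v) →
    ∀ (p : Array Bool × Array Int) (S : Int → Prop),
    p.1.size = N.toNat + 1 →
    (∀ w : Int, 0 ≤ w → w ≤ N → (p.1.getD w.toNat false = true ↔ (V w ∨ w ∈ p.2))) →
    (∀ w, w ∈ p.2 ↔ S w) →
    (F.foldl (fun p v => cs.foldl (pvInner N v) p) p).1.size = N.toNat + 1 ∧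
    (∀ w : Int, 0 ≤ w → w ≤ N →
      ((F.foldl (fun p v => cs.foldl (pvInner N v) p) p).1.getD w.toNat false = true ↔
        (V w ∨ w ∈ (F.foldl (fun p v => cs.foldl (pvInner N v) p) p).2))) ∧
    (∀ w, w ∈ (F.foldl (fun p v => cs.foldl (pvInner N v) p) p).2 ↔
      S w ∨ ∃ v ∈ F, ∃ c ∈ cs, w = v + c ∧ w ≤ N ∧ ¬ V w) := by
  intro F
  induction F with
  | nil =>
    intro _ p S hsz h1 h2
    refine ⟨hsz, h1, fun w => ?_⟩
    simp only [List.foldl_nil, List.not_mem_nil, false_and, exists_false, or_false]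
    exact h2 w
  | cons v rest ih =>
    intro hF0 p S hsz h1 h2
    have hv0 : (0 : Int) ≤ v := hF0 v List.mem_cons_self
    have hrest : ∀ v' ∈ rest, (0 : Int) ≤ v' := fun v' hv' => hF0 v' (List.mem_cons_of_mem _ hv')
    simp only [List.foldl_cons]
    obtain ⟨g0, g1, g2⟩ := bfs_inner N v hv0 V cs hc1 p S hsz h1 h2
    obtain ⟨r0, r1, r2⟩ := ih hrest (cs.foldl (pvInner N v) p)
      (fun w => S w ∨ ∃ c ∈ cs, w = v + c ∧ w ≤ N ∧ ¬ V w) g0 g1 g2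
    refine ⟨r0, r1, fun w => Iff.trans (r2 w) ?_⟩
    simp only [List.mem_cons]
    constructor
    · rintro ((hs | ⟨c, hc, rfl, hn, hv⟩) | ⟨v', hv', c, hc, rfl, hn, hnv⟩)
      · exact Or.inl hs
      · exact Or.inr ⟨v, Or.inl rfl, c, hc, rfl, hn, hv⟩
      · exact Or.inr ⟨v', Or.inr hv', c, hc, rfl, hn, hnv⟩
    · rintro (hs | ⟨v', (rfl | hv'), c, hc, rfl, hn, hnv⟩)
      · exact Or.inl (Or.inl hs)
      · exact Or.inl (Or.inr ⟨c, hc, rfl, hn, hnv⟩)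
      · exact Or.inr ⟨v', hv', c, hc, rfl, hn, hnv⟩

theorem bfs_main (N : Int) (hN : 0 ≤ N) (cs : List Int)
    (hcs : ∀ c, c ∈ cs ↔ (∃ k : Int, 1 ≤ k ∧ c = k * k * k) ∧ c ≤ N) :
    ∀ (fuel : Nat) (visited : Array Bool) (frontier : Array Int) (d : Int),
    visited.size = N.toNat + 1 →
    (∀ v : Int, 0 ≤ v → v ≤ N → (visited.getD v.toNat false = true ↔ pvMI v ≤ d)) →
    (∀ v, v ∈ frontier ↔ 0 ≤ v ∧ v ≤ N ∧ pvMI v = d) →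
    0 ≤ d → d ≤ pvMI N → pvMI N - d < fuel →
    pvBfsB N cs fuel visited frontier d = pvMI N := by
  have hc1 : ∀ c ∈ cs, 1 ≤ c := fun c hc => pvCube_one_le c ((hcs c).mp hc).1
  intro fuel
  induction fuel with
  | zero =>
    intro visited frontier d _ _ _ _ _ hfuel
    omega
  | succ t ih =>
    intro visited frontier d hsz hvis hfr hd0 hdm hfuel
    simp only [pvBfsB]
    split_ifs with hc
    · have := (hvis N hN (le_refl _)).mp hc
      omega
    · have hdlt : d < pvMI N := by
        rcases lt_or_eq_of_le hdm with h | h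
        · exact h
        · exact absurd ((hvis N hN (le_refl _)).mpr (by omega)) (by simpa using hc)
      have hF0 : ∀ v ∈ frontier.toList, (0 : Int) ≤ v := by
        intro v hv
        exact ((hfr v).mp (Array.mem_def.mpr hv)).1
      obtain ⟨q0, q1, q2⟩ := bfs_outer N (fun w => pvMI w ≤ d) cs hc1 frontier.toList hF0
        (visited, (#[] : Array Int)) (fun _ => False)
        hsz
        (by
          intro w hw hwN
          simp only
          rw [hvis w hw hwN]
          constructor
          · exact fun h => Or.inl h
          · rintro (h | h)
            · exact h
            · simp at h)
        (by intro w; constructor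
            · intro h; simp at h
            · intro h; exact absurd h not_false)
      have hfold : frontier.foldl (fun (p : Array Bool × Array Int) v =>
            cs.foldl (fun (p : Array Bool × Array Int) c =>
              let w := v + c
              if w ≤ N ∧ p.1.getD w.toNat false = false then (p.1.setIfInBounds w.toNat true, p.2.push w) else p) p)
          (visited, (#[] : Array Int)) =
          frontier.toList.foldl (fun (p : Array Bool × Array Int) v => cs.foldl (pvInner N v) p)
          (visited, (#[] : Array Int)) :=
        (Array.foldl_toList _).symm
      rw [hfold]
      set q := frontier.toList.foldl (fun (p : Array Bool × Array Int) v => cs.foldl (pvInner N v) p)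
          (visited, (#[] : Array Int)) with hqdef
      have hq2 : ∀ w, w ∈ q.2 ↔ 0 ≤ w ∧ w ≤ N ∧ pvMI w = d + 1 := by
        intro w
        rw [q2 w]
        constructor
        · rintro (hfalse | ⟨v, hvF, c, hcC, rfl, hwN, hnv⟩)
          · exact absurd hfalse not_false
          · obtain ⟨hv0, hvN, hmd⟩ := (hfr v).mp (Array.mem_def.mpr hvF)
            obtain ⟨hcube, hcN⟩ := (hcs c).mp hcC
            have hcpos := pvCube_one_le c hcube
            have hle := pvMI_le (v + c) c hcube (by omega)
            have hvc : v + c - c = v := by ring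
            rw [hvc] at hle
            exact ⟨by omega, hwN, by omega⟩
        · rintro ⟨hw0, hwN, hmw⟩
          have hw1 : 1 ≤ w := by
            rcases eq_or_lt_of_le hw0 with rfl | h
            · have h00 : pvMI 0 = 0 := by unfold pvMI; simp [pvM]
              omega
            · omega
          obtain ⟨c, hcube, hcp1, hcw, heq⟩ := pvMI_attained w hw1
          exact Or.inr ⟨w - c, Array.mem_def.mp ((hfr _).mpr ⟨by omega, by omega, by omega⟩),
            c, (hcs c).mpr ⟨hcube, by omega⟩, by omega, hwN, by omega⟩
      have hq1 : ∀ w : Int, 0 ≤ w → w ≤ N → (q.1.getD w.toNat false = true ↔ pvMI w ≤ d + 1) := by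
        intro w hw hwN
        rw [q1 w hw hwN, hq2 w]
        constructor
        · rintro (h | ⟨_, _, h⟩)
          · omega
          · omega
        · intro h
          rcases eq_or_lt_of_le h with he | hl
          · exact Or.inr ⟨hw, hwN, he⟩
          · exact Or.inl (by omega)
      exact ih q.1 q.2 (d + 1) q0 hq1 hq2 (by omega) (by omega) (by omega)

theorem alt_eq (N : Int) (hN : 1 ≤ N) : solution_alt N = pvMI N := by
  unfold solution_alt
  rw [if_neg (by omega)]
  refine bfs_main N (by omega) _ (memCubesB N (by omega)) (N.toNat + 1)
    ((Array.replicate (N.toNat + 1) false).setIfInBounds 0 true) #[0] 0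
    (by rw [Array.size_setIfInBounds, Array.size_replicate])
    ?_ ?_ (le_refl _) (pvMI_nonneg N) ?_
  · intro v hv hvN
    rw [Array.getD_eq_getD_getElem?]
    rcases eq_or_lt_of_le hv with rfl | hpos
    · simp only [Int.toNat_zero]
      rw [Array.getElem?_setIfInBounds_self, if_pos (by rw [Array.size_replicate]; omega)]
      have h00 : pvMI 0 = 0 := by unfold pvMI; simp [pvM]
      simp [h00]
    · have hne : (0 : Nat) ≠ v.toNat := by omega
      rw [Array.getElem?_setIfInBounds_ne hne, Array.getElem?_replicate, if_pos (by omega)]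
      have := pvMI_nonneg v
      have := (pvMI_eq_zero v (by omega))
      simp only [Option.getD_some]
      constructor
      · intro h; exact absurd h (by simp)
      · intro h
        have : v = 0 := (pvMI_eq_zero v (by omega)).mp (by omega)
        omega
  · intro v
    constructor
    · intro hv
      have : v = 0 := by
        have := Array.mem_def.mp hv
        simpa using this
      subst this
      have h00 : pvMI 0 = 0 := by unfold pvMI; simp [pvM]
      exact ⟨le_refl _, by omega, h00⟩
    · rintro ⟨h0, h1, h2⟩
      have hv0 : v = 0 := (pvMI_eq_zero v h0).mp h2
      subst hv0
      exact Array.mem_def.mpr (by simp)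
  · have := pvMI_le_self N (by omega)
    omega

def pvInnerA (i : Int) (dp : Array (Option Int)) (cube : Int) : Array (Option Int) :=
  if cube ≤ i then
    match dp[(i - cube).toNat]?, dp[i.toNat]? with
    | some (some v), some (some w) => if v + 1 < w then dp.setIfInBounds i.toNat (some (v + 1)) else dp
    | some (some v), some none => dp.setIfInBounds i.toNat (some (v + 1))
    | _, _ => dp
  else dp

def pvApplyO (dp : Array (Option Int)) (i : Int) (o : Option Int) : Array (Option Int) :=
  match o with
  | none => dp
  | some t => dp.setIfInBounds i.toNat (some t)

theorem inner_sim (N i : Int) (dp : Array (Option Int)) (hlen : dp.size = (N + 1).toNat)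
    (hi1 : 1 ≤ i) (hiN : i ≤ N)
    (hlow : ∀ j : Nat, (j : Int) < i → j < dp.size → dp[j]? = some (some (pvMI (j : Int))))
    (hati : dp[i.toNat]? = some none) :
    ∀ (cs : List Int), (∀ c ∈ cs, 1 ≤ c) →
    ∀ (o : Option Int), cs.foldl (pvInnerA i) (pvApplyO dp i o) = pvApplyO dp i (cs.foldl (pvBestStep i) o) := by
  intro cs
  induction cs with
  | nil => intro _ o; rfl
  | cons c rest ih =>
    intro hcs o
    simp only [List.foldl_cons]
    have hc1 : 1 ≤ c := hcs c List.mem_cons_self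
    have hrest : ∀ c ∈ rest, 1 ≤ c := fun c hc => hcs c (List.mem_cons_of_mem _ hc)
    have hilen : i.toNat < dp.size := by omega
    by_cases hci : c ≤ i
    · have hcast1 : ((i - c).toNat : Int) = i - c := by omega
      have hbase := hlow (i - c).toNat (by omega) (by omega)
      rw [hcast1] at hbase
      cases o with
      | none =>
        have hstepA : pvInnerA i (pvApplyO dp i none) c = dp.setIfInBounds i.toNat (some (pvMI (i - c) + 1)) := by
          show pvInnerA i dp c = _
          unfold pvInnerA
          rw [if_pos hci, hbase, hati]
        have hbstep : pvBestStep i (none : Option Int) c = some (pvMI (i - c) + 1) := by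
          unfold pvBestStep
          rw [if_pos hci]
        rw [hstepA, hbstep]
        exact ih hrest (some (pvMI (i - c) + 1))
      | some t =>
        have hread1 : (dp.setIfInBounds i.toNat (some t))[(i - c).toNat]? = some (some (pvMI (i - c))) := by
          rw [Array.getElem?_setIfInBounds_ne (by omega), hbase]
        have hread2 : (dp.setIfInBounds i.toNat (some t))[i.toNat]? = some (some t) := by
          rw [Array.getElem?_setIfInBounds_self, if_pos hilen]
        have hstepA : pvInnerA i (pvApplyO dp i (some t)) c = pvApplyO dp i (some (min t (pvMI (i - c) + 1))) := by
          show pvInnerA i (dp.setIfInBounds i.toNat (some t)) c = _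
          unfold pvInnerA
          rw [if_pos hci, hread1, hread2]
          show (if pvMI (i - c) + 1 < t then
                  (dp.setIfInBounds i.toNat (some t)).setIfInBounds i.toNat (some (pvMI (i - c) + 1))
                else dp.setIfInBounds i.toNat (some t)) = _
          split_ifs with hlt
          · rw [Array.setIfInBounds_setIfInBounds]
            simp only [pvApplyO]
            have hmn : min t (pvMI (i - c) + 1) = pvMI (i - c) + 1 := by omega
            rw [hmn]
          · simp only [pvApplyO]
            have hmn : min t (pvMI (i - c) + 1) = t := by omega
            rw [hmn]
        have hbstep : pvBestStep i (some t) c = some (min t (pvMI (i - c) + 1)) := by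
          unfold pvBestStep
          rw [if_pos hci]
        rw [hstepA, hbstep]
        exact ih hrest (some (min t (pvMI (i - c) + 1)))
    · have hstepA : pvInnerA i (pvApplyO dp i o) c = pvApplyO dp i o := by
        unfold pvInnerA
        rw [if_neg hci]
      have hbstep : pvBestStep i o c = o := by unfold pvBestStep; rw [if_neg hci]
      rw [hstepA, hbstep]
      exact ih hrest o

def pvDp0 (N : Int) : Array (Option Int) :=
  (Array.replicate (N + 1).toNat (none : Option Int)).setIfInBounds 0 (some 0)

theorem outer_sim (N : Int) (hN : 0 ≤ N) (cs : List Int)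
    (hcs : ∀ c, c ∈ cs ↔ (∃ k : Int, 1 ≤ k ∧ c = k * k * k) ∧ c ≤ N) :
    ∀ (t : Nat), ((t : Nat) : Int) ≤ N →
    ((PySem.List.pyRange 1 (1 + (t : Int))).foldl (fun dp i => cs.foldl (pvInnerA i) dp) (pvDp0 N)).size = (N + 1).toNat ∧
    ∀ j : Nat, j < (N + 1).toNat →
      ((PySem.List.pyRange 1 (1 + (t : Int))).foldl (fun dp i => cs.foldl (pvInnerA i) dp) (pvDp0 N))[j]? =
        some (if (j : Int) < 1 + (t : Int) then some (pvMI (j : Int)) else none) := by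
  intro t
  induction t with
  | zero =>
    intro _
    rw [show ((0 : Nat) : Int) = 0 from rfl, PySem.List.pyRange_one_eq_nil (by omega)]
    simp only [List.foldl_nil]
    have hlen : (pvDp0 N).size = (N + 1).toNat := by
      unfold pvDp0
      rw [Array.size_setIfInBounds, Array.size_replicate]
    refine ⟨hlen, fun j hj => ?_⟩
    unfold pvDp0
    rcases Nat.eq_zero_or_pos j with rfl | hpos
    · rw [Array.getElem?_setIfInBounds_self, if_pos (by rw [Array.size_replicate]; omega)]
      rw [if_pos (by omega)]
      have h00 : pvMI ((0 : Nat) : Int) = 0 := by unfold pvMI; simp [pvM]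
      rw [h00]
    · rw [Array.getElem?_setIfInBounds_ne (by omega), Array.getElem?_replicate, if_pos (by omega)]
      rw [if_neg (by omega)]
  | succ t ih =>
    intro hle
    have hle' : ((t : Nat) : Int) ≤ N := by push_cast at hle ⊢; omega
    obtain ⟨ihlen, ihval⟩ := ih hle'
    have hcast : (((t + 1 : Nat)) : Int) = (t : Int) + 1 := by push_cast; ring
    have hsplit : PySem.List.pyRange 1 (1 + ((t + 1 : Nat) : Int)) =
        PySem.List.pyRange 1 (1 + (t : Int)) ++ [1 + (t : Int)] := by
      rw [hcast, show (1 : Int) + ((t : Int) + 1) = (1 + (t : Int)) + 1 by ring]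
      exact PySem.List.pyRange_one_succ_right (by omega)
    rw [hsplit, List.foldl_append]
    set i : Int := 1 + (t : Int) with hidef
    set dpPrev := (PySem.List.pyRange 1 (1 + (t : Int))).foldl (fun dp i => cs.foldl (pvInnerA i) dp) (pvDp0 N) with hdp
    have hiN : i ≤ N := by push_cast at hle; omega
    have hitoNat : i.toNat = t + 1 := by omega
    have hlow : ∀ j : Nat, (j : Int) < i → j < dpPrev.size → dpPrev[j]? = some (some (pvMI (j : Int))) := by
      intro j hj hjl
      rw [ihlen] at hjl
      rw [ihval j hjl, if_pos hj]
    have hati : dpPrev[i.toNat]? = some none := by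
      rw [hitoNat]
      have h1 : t + 1 < (N + 1).toNat := by omega
      rw [ihval (t + 1) h1, if_neg (by push_cast; omega)]
    have hc1 : ∀ c ∈ cs, 1 ≤ c := fun c hc => pvCube_one_le c ((hcs c).mp hc).1
    have hsim := inner_sim N i dpPrev ihlen (by omega) hiN hlow hati cs hc1 none
    have hfull := best_full N i (by omega) hiN cs hcs
    rw [hfull] at hsim
    have hres : cs.foldl (pvInnerA i) dpPrev = dpPrev.setIfInBounds i.toNat (some (pvMI i)) := hsim
    simp only [List.foldl_cons, List.foldl_nil]
    rw [hres]
    constructor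
    · rw [Array.size_setIfInBounds, ihlen]
    · intro j hj
      by_cases hji : j = i.toNat
      · subst hji
        rw [Array.getElem?_setIfInBounds_self, if_pos (by rw [ihlen]; omega)]
        rw [if_pos (by push_cast; omega)]
        congr 2
      · rw [Array.getElem?_setIfInBounds_ne (by omega), ihval j hj]
        by_cases hlt : (j : Int) < i
        · rw [if_pos hlt, if_pos (by push_cast at hlt ⊢; omega)]
        · rw [if_neg hlt, if_neg (by push_cast at hlt ⊢; omega)]

theorem pvExtract (dp : Array (Option Int)) (N x : Int)
    (h : dp[N.toNat]? = some (some x)) :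
    (match dp[N.toNat]? with
     | some (some v) => v
     | _ => 0) = x := by
  rw [h]

theorem solutionA_eq (N : Int) (hN : 0 ≤ N) : solution N = pvMI N := by
  have hcs := memCubesA N hN
  obtain ⟨hl, hv⟩ := outer_sim N hN
    (pvCubesLoopA N (PySem.List.pyRange 1 (((pvIcbrt N.toNat : Nat) : Int) + 2 + 1))) hcs
    N.toNat (by omega)
  have key := hv N.toNat (by omega)
  rw [if_pos (by omega)] at key
  have key' : ((PySem.List.pyRange 1 (1 + ((N.toNat : Nat) : Int))).foldl
      (fun dp i => (pvCubesLoopA N (PySem.List.pyRange 1 (((pvIcbrt N.toNat : Nat) : Int) + 2 + 1))).foldl (pvInnerA i) dp)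
      (pvDp0 N))[N.toNat]? = some (some (pvMI N)) := by
    rw [key]
    congr 2
  have hrange : (1 : Int) + ((N.toNat : Nat) : Int) = N + 1 := by omega
  rw [hrange] at key'
  unfold solution
  exact pvExtract _ N (pvMI N) key'

theorem final_equal (N : Int) (hN : 0 ≤ N) : solution N = solution_alt N := by
  rw [solutionA_eq N hN]
  rcases eq_or_lt_of_le hN with h | h
  · rw [← h]
    unfold solution_alt
    rw [if_pos (by omega)]
    unfold pvMI
    simp [pvM]
  · rw [alt_eq N (by omega)]

-- ===== VERDICT (by name: the statement is the Claim_ definition above) =====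
theorem solution_spec : Claim_equal_solution := by
  intro N _ hN
  unfold Pre_solution at hN
  unfold Spec_solution
  exact final_equal N hN
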